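-- pv_equiv track=rewrite | github.com/CMDRZero/SimpleRSApy | RSA.py | Dec85
-- ===== SOURCE A (Python) =====
-- gZ85 = '0123456789abcdefghijklmnopqrstuvwxyzABCDEFGHIJKLMNOPQRSTUVWXYZ.-:+=^!/*?&<>()[]{}@%$#'
--
-- def Dec85(m):
--     m = m.zfill(5*-(-len(m)//5))[::-1]
--     v = 0
--     p = 1
--     for i in range(len(m)//5):
--         b = m[5*i:][:5]
--         for j in range(5):
--             v += gZ85.index(b[j]) * 85**j * p
--         p *= 256**4
--     return v
-- ===== SOURCE B (Python) =====
-- gZ85 = '0123456789abcdefghijklmnopqrstuvwxyzABCDEFGHIJKLMNOPQRSTUVWXYZ.-:+=^!/*?&<>()[]{}@%$#'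
--
-- def Dec85(m):
--     idx = {c: i for i, c in enumerate(gZ85)}
--     s = m.zfill(5 * -(-len(m) // 5))
--     v = 0
--     while s:
--         g = 0
--         for c in s[:5]:
--             g = g * 85 + idx[c]
--         v = v * 256**4 + g
--         s = s[5:]
--     return v
-- ===== Notes on version B (the rewrite author's own statement) =====
-- stated objective: faster
-- what changed: B builds a dict from char to digit once (removing the inner gZ85.index scan), drops the string reversal and all explicit power terms (85**j, 256**(4*i), the running p), and scans the padded string left-to-right in 5-char groups with nested Horner multiply-accumulate (g = g*85 + idx[c]; v = v*256**4 + g).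
import Mathlib
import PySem

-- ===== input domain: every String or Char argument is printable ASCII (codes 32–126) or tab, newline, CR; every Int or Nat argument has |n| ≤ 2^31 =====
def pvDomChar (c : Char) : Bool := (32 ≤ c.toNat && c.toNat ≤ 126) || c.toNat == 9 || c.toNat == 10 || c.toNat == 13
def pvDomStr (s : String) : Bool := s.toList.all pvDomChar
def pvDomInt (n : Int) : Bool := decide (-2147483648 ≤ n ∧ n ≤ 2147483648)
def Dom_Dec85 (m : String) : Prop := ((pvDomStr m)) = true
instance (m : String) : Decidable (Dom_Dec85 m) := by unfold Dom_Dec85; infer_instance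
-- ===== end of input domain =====

-- B builds a char→digit dict once (no inner gZ85.index scan), drops the reversal and all explicit
-- 85**j / 256**(4*i) power terms, and decodes the zfill-padded string left-to-right by nested
-- Horner multiply-accumulate (objective: faster, constant-factor; measured).

-- ===== PORT A =====
-- the characters of the Python string gZ85, as a char list
def gZ85 : List Char := ['0', '1', '2', '3', '4', '5', '6', '7', '8', '9', 'a', 'b', 'c', 'd', 'e', 'f', 'g', 'h', 'i', 'j', 'k', 'l', 'm', 'n', 'o', 'p', 'q', 'r', 's', 't', 'u', 'v', 'w', 'x', 'y', 'z', 'A', 'B', 'C', 'D', 'E', 'F', 'G', 'H', 'I', 'J', 'K', 'L', 'M', 'N', 'O', 'P', 'Q', 'R', 'S', 'T', 'U', 'V', 'W', 'X', 'Y', 'Z', '.', '-', ':', '+', '=', '^', '!', '/', '*', '?', '&', '<', '>', '(', ')', '[', ']', '{', '}', '@', '%', '$', '#']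

-- gZ85.index(c); total form of the index, used only under Pre_ (c ∈ gZ85, else Python raises ValueError)
def ic (c : Char) : Int := (((PySem.List.index? gZ85 c).getD 0 : Nat) : Int)

def Dec85 (m : String) : Int :=
  let m2 : List Char :=
    (PySem.Chars.zfill m.toList (5 * (-(PySem.Int.floordiv (-(m.toList.length : Int)) 5)))).reverse
  let vp : Int × Int :=
    (PySem.List.pyRange 0 (PySem.Int.floordiv (m2.length : Int) 5) 1).foldl
      (fun (vp : Int × Int) i =>
        let b := PySem.List.slice (PySem.List.slice m2 (some (5 * i)) none) none (some 5)
        ((PySem.List.pyRange 0 5 1).foldl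
          (fun v j => v + ic (PySem.List.pyGetD b j '0') * 85 ^ j.toNat * vp.2) vp.1,
         vp.2 * 256 ^ 4))
      (0, 1)
  vp.1

-- ===== PORT B =====
-- the Python string constant of Source B
def gZ85S : String := "0123456789abcdefghijklmnopqrstuvwxyzABCDEFGHIJKLMNOPQRSTUVWXYZ.-:+=^!/*?&<>()[]{}@%$#"

-- idx = {c: i for i, c in enumerate(gZ85)}
def altIdx : PySem.Dict Char Int :=
  (PySem.List.enumerate gZ85S.toList).foldl (fun d p => d.insert p.2 p.1) PySem.Dict.empty

-- idx[c]; total form of the dict lookup, used only under Pre_ (missing key = Python KeyError)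
def icB (c : Char) : Int := (altIdx.get? c).getD 0

-- the while-loop of Source B: consume the padded string five chars at a time, Horner inside and outside
def altGo (v : Int) (s : List Char) : Int :=
  if h : s = [] then v
  else altGo (v * 256 ^ 4 + (s.take 5).foldl (fun g c => g * 85 + icB c) 0) (s.drop 5)
termination_by s.length
decreasing_by
  cases s with
  | nil => exact absurd rfl h
  | cons a t => simp

def Dec85_alt (m : String) : Int :=
  altGo 0 (PySem.Chars.zfill m.toList (5 * (-(PySem.Int.floordiv (-(m.toList.length : Int)) 5))))

-- ===== PRECONDITION & SPEC =====
-- Pre_ excludes exactly the inputs containing a character outside gZ85, on which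
-- Python raises (ValueError from gZ85.index in A, KeyError from the dict in B).
def Pre_Dec85 (m : String) : Prop := (m.toList.all (fun c => gZ85.contains c)) = true
instance (m : String) : Decidable (Pre_Dec85 m) := by unfold Pre_Dec85; infer_instance

def pvWitness_Dec85 : String := "Az9"

def Spec_Dec85 (m : String) (out : Int) : Prop := out = Dec85_alt m
instance (m : String) (out : Int) : Decidable (Spec_Dec85 m out) := by unfold Spec_Dec85; infer_instance

-- ===== CLAIM (what is proved, stated in full; the proofs are below) =====
def Claim_equal_Dec85 : Prop := ∀ (m : String), Dom_Dec85 m → Pre_Dec85 m → Spec_Dec85 m (Dec85 m)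

-- ===== LEMMAS AND PROOFS =====

-- for characters of the alphabet, B's dict lookup is A's list index
-- the dict built by folding insert over enumerate xs answers get? with index? (first index, keys distinct)
lemma build_get (xs : List Char) (c : Char) (s : Int) (d : PySem.Dict Char Int)
    (hnd : xs.Nodup) :
    ((PySem.List.enumerate xs s).foldl (fun d p => d.insert p.2 p.1) d).get? c =
      match PySem.List.index? xs c with
      | some i => some (s + (i : Int))
      | none => d.get? c := by
  induction xs generalizing s d with
  | nil => simp [PySem.List.enumerate_nil, PySem.List.index?]
  | cons x xs ih =>
    rw [PySem.List.enumerate_cons]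
    simp only [List.foldl_cons]
    rw [ih _ _ (List.Nodup.of_cons hnd)]
    by_cases hcx : c = x
    · subst hcx
      have hnotin : c ∉ xs := (List.nodup_cons.mp hnd).1
      rw [(PySem.List.index?_eq_none_iff (xs := xs) (v := c)).mpr hnotin,
          PySem.List.index?_cons_self]
      simp [PySem.Dict.get?_insert_self]
    · rw [PySem.List.index?_cons_of_ne xs (Ne.symm hcx)]
      cases hidx : PySem.List.index? xs c with
      | some i =>
        simp only [Option.map_some]
        push_cast
        ring_nf
      | none =>
        simp only [Option.map_none]
        rw [PySem.Dict.get?_insert_of_ne _ _ hcx]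

lemma gZ85S_toList : gZ85S.toList = gZ85 := by decide

set_option maxRecDepth 2000 in
lemma gZ85_nodup : gZ85.Nodup := by decide

lemma icB_eq_ic : ∀ c ∈ gZ85, icB c = ic c := by
  intro c hc
  obtain ⟨i, hi⟩ := Option.isSome_iff_exists.mp
    ((PySem.List.index?_isSome_iff (xs := gZ85) (v := c)).mpr hc)
  unfold icB altIdx
  rw [gZ85S_toList, build_get gZ85 c 0 PySem.Dict.empty gZ85_nodup]
  unfold ic
  rw [hi]
  simp

-- every character of a zfill-padded string is a character of the original or the pad '0'
lemma zfill_mem (cs : List Char) (w : Int) :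
    ∀ c ∈ PySem.Chars.zfill cs w, c ∈ cs ∨ c = '0' := by
  intro c hc
  unfold PySem.Chars.zfill at hc
  split_ifs at hc with h1
  · exact Or.inl hc
  · cases cs with
    | nil =>
      simp only at hc
      exact Or.inr (List.eq_of_mem_replicate hc)
    | cons a rest =>
      simp only at hc
      split_ifs at hc with h2
      · rcases List.mem_cons.mp hc with rfl | hc
        · exact Or.inl (List.mem_cons_self ..)
        · rcases List.mem_append.mp hc with hr | hr
          · exact Or.inr (List.eq_of_mem_replicate hr)
          · exact Or.inl (List.mem_cons_of_mem _ hr)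
      · rcases List.mem_append.mp hc with hr | hr
        · exact Or.inr (List.eq_of_mem_replicate hr)
        · exact Or.inl hr

-- value of one 5-char block, least-significant char first (A's inner sum)
def gL : List Char → Int
  | [a, b, c, d, e] => ic a + ic b * 85 + ic c * 85 ^ 2 + ic d * 85 ^ 3 + ic e * 85 ^ 4
  | _ => 0

-- reference value: blocks of 5 from the left, least-significant block first
def E (r : List Char) : Int :=
  if h : r = [] then 0
  else gL (r.take 5) + 256 ^ 4 * E (r.drop 5)
termination_by r.length
decreasing_by
  cases r with
  | nil => exact absurd rfl h
  | cons a t => simp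

lemma innerA (b : List Char) (hb : b.length = 5) (v0 pw : Int) :
    (PySem.List.pyRange 0 5 1).foldl
      (fun v j => v + ic (PySem.List.pyGetD b j '0') * 85 ^ j.toNat * pw) v0
    = v0 + pw * gL b := by
  obtain ⟨a, b1, c, d, e, rfl⟩ : ∃ a b1 c d e, b = [a, b1, c, d, e] := by
    match b, hb with
    | [a, b1, c, d, e], _ => exact ⟨a, b1, c, d, e, rfl⟩
  have hr : PySem.List.pyRange 0 5 1 = [0, 1, 2, 3, 4] := by decide
  rw [hr]
  simp [List.foldl, PySem.List.pyGetD, PySem.List.pyGet?, PySem.List.pyIdx?, gL]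
  ring

lemma gM_rev (t : List Char) (ht : t.length = 5) (hm : ∀ c ∈ t, c ∈ gZ85) :
    t.foldl (fun g c => g * 85 + icB c) 0 = gL t.reverse := by
  obtain ⟨a, b1, c, d, e, rfl⟩ : ∃ a b1 c d e, t = [a, b1, c, d, e] := by
    match t, ht with
    | [a, b1, c, d, e], _ => exact ⟨a, b1, c, d, e, rfl⟩
  have hrev : ([a, b1, c, d, e] : List Char).reverse = [e, d, c, b1, a] := by
    simp
  rw [hrev]
  simp only [List.foldl, gL]
  rw [icB_eq_ic a (hm a (by simp)), icB_eq_ic b1 (hm b1 (by simp)),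
      icB_eq_ic c (hm c (by simp)), icB_eq_ic d (hm d (by simp)),
      icB_eq_ic e (hm e (by simp))]
  ring

lemma E_nil : E [] = 0 := by
  unfold E; simp

lemma E_ne_nil (r : List Char) (h : r ≠ []) :
    E r = gL (r.take 5) + 256 ^ 4 * E (r.drop 5) := by
  rw [E]; simp [h]

lemma E_append_block (k : Nat) (r b : List Char) (hr : r.length = 5 * k) (hb : b.length = 5) :
    E (r ++ b) = E r + (256 ^ 4) ^ k * gL b := by
  induction k generalizing r with
  | zero =>
    have hr0 : r = [] := List.length_eq_zero_iff.mp (by omega)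
    subst hr0
    have hb0 : b ≠ [] := by intro h; rw [h] at hb; simp at hb
    rw [List.nil_append, E_ne_nil b hb0, E_nil]
    rw [List.take_of_length_le (by omega), List.drop_eq_nil_of_le (by omega), E_nil]
    ring
  | succ k ih =>
    have hne : r ≠ [] := by intro h; rw [h] at hr; simp at hr
    have h5 : 5 ≤ r.length := by omega
    have happ : r ++ b ≠ [] := by simp [hne]
    rw [E_ne_nil _ happ, List.take_append_of_le_length h5, List.drop_append_of_le_length h5]
    rw [ih (r.drop 5) (by simp only [List.length_drop]; omega)]
    rw [E_ne_nil r hne]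
    ring

lemma altGo_nil (v : Int) : altGo v [] = v := by
  unfold altGo; simp

lemma altGo_ne_nil (v : Int) (p : List Char) (h : p ≠ []) :
    altGo v p = altGo (v * 256 ^ 4 + (p.take 5).foldl (fun g c => g * 85 + icB c) 0) (p.drop 5) := by
  rw [altGo]; simp [h]

lemma altGo_eq (k : Nat) (p : List Char) (hp : p.length = 5 * k)
    (hm : ∀ c ∈ p, c ∈ gZ85) (v : Int) :
    altGo v p = v * (256 ^ 4) ^ k + E p.reverse := by
  induction k generalizing p v with
  | zero =>
    have hp0 : p = [] := List.length_eq_zero_iff.mp (by omega)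
    subst hp0
    rw [altGo_nil]
    simp [E_nil]
  | succ k ih =>
    have hne : p ≠ [] := by intro h; rw [h] at hp; simp at hp
    have htlen : (p.take 5).length = 5 := by simp only [List.length_take]; omega
    rw [altGo_ne_nil v p hne,
        ih (p.drop 5) (by simp only [List.length_drop]; omega)
           (fun c hc => hm c (List.mem_of_mem_drop hc))]
    have hrev : p.reverse = (p.drop 5).reverse ++ (p.take 5).reverse := by
      conv_lhs => rw [← List.take_append_drop 5 p]
      rw [List.reverse_append]
    rw [hrev, E_append_block k _ _ (by simp only [List.length_reverse, List.length_drop]; omega) (by simp only [List.length_reverse, List.length_take]; omega)]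
    rw [gM_rev (p.take 5) htlen (fun c hc => hm c (List.mem_of_mem_take hc))]
    ring

-- A's fold as a function of the group count
def aF (r : List Char) (k : Nat) : Int × Int :=
  (PySem.List.pyRange 0 (k : Int) 1).foldl
    (fun (vp : Int × Int) i =>
      let b := PySem.List.slice (PySem.List.slice r (some (5 * i)) none) none (some 5)
      ((PySem.List.pyRange 0 5 1).foldl
        (fun v j => v + ic (PySem.List.pyGetD b j '0') * 85 ^ j.toNat * vp.2) vp.1,
       vp.2 * 256 ^ 4))
    (0, 1)

lemma aF_zero (r : List Char) : aF r 0 = (0, 1) := by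
  unfold aF
  rw [PySem.List.pyRange_one_eq_nil (a := 0) (b := ((0:Nat):Int)) (by simp)]
  rfl

lemma aF_succ (r : List Char) (k : Nat) :
    aF r (k + 1) =
      ((PySem.List.pyRange 0 5 1).foldl
        (fun v j => v + ic (PySem.List.pyGetD
            (PySem.List.slice (PySem.List.slice r (some (5 * (k : Int))) none) none (some 5)) j '0')
          * 85 ^ j.toNat * (aF r k).2) (aF r k).1,
       (aF r k).2 * 256 ^ 4) := by
  unfold aF
  have hc : ((k + 1 : Nat) : Int) = (k : Int) + 1 := by push_cast; ring
  rw [hc, PySem.List.pyRange_one_succ_right (by positivity), List.foldl_append]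
  rfl

lemma aF_snd (r : List Char) (k : Nat) : (aF r k).2 = (256 ^ 4) ^ k := by
  induction k with
  | zero => rw [aF_zero]; rfl
  | succ k ih => rw [aF_succ, ih]; ring

lemma block_slice (r b s : List Char) (k : Nat) (hr : r.length = 5 * k) (hb : b.length = 5) :
    PySem.List.slice (PySem.List.slice (r ++ b ++ s) (some (5 * (k : Int))) none) none (some 5) = b := by
  rw [PySem.List.slice_from _ (by positivity), PySem.List.slice_to _ (by norm_num)]
  have h1 : ((5 * (k : Int)).toNat) = 5 * k := by omega
  have h2 : ((5 : Int).toNat) = 5 := rfl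
  rw [h1, h2, List.append_assoc, List.drop_append_of_le_length (by omega)]
  rw [List.drop_eq_nil_of_le (by omega), List.nil_append,
      List.take_append_of_le_length (by omega), List.take_of_length_le (by omega)]

lemma aF_pref (k : Nat) (r s : List Char) (hr : r.length = 5 * k) :
    (aF (r ++ s) k).1 = E r := by
  induction k generalizing r s with
  | zero =>
    have hr0 : r = [] := List.length_eq_zero_iff.mp (by omega)
    subst hr0
    rw [aF_zero, E_nil]
  | succ k ih =>
    have h5 : 5 * k + 5 ≤ r.length := by omega
    have hdec : r = r.take (5 * k) ++ r.drop (5 * k) := (List.take_append_drop _ _).symm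
    have hlen1 : (r.take (5 * k)).length = 5 * k := by simp only [List.length_take]; omega
    have hlen2 : (r.drop (5 * k)).length = 5 := by simp only [List.length_drop]; omega
    rw [aF_succ]
    have hre : r ++ s = r.take (5 * k) ++ r.drop (5 * k) ++ s := by rw [← hdec]
    rw [hre, block_slice _ _ _ k hlen1 hlen2]
    rw [innerA _ hlen2, aF_snd]
    have hih : (aF (r.take (5 * k) ++ r.drop (5 * k) ++ s) k).1 = E (r.take (5 * k)) := by
      rw [List.append_assoc]
      exact ih _ _ hlen1
    rw [hih, ← E_append_block k _ _ hlen1 hlen2, ← hdec]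

lemma aF_eq_E (k : Nat) (r : List Char) (hr : r.length = 5 * k) :
    (aF r k).1 = E r := by
  have := aF_pref k r [] hr
  rwa [List.append_nil] at this

lemma main_eq (p : List Char) (k : Nat) (hp : p.length = 5 * k)
    (hm : ∀ c ∈ p, c ∈ gZ85) :
    (aF p.reverse k).1 = altGo 0 p := by
  have h1 := aF_eq_E k p.reverse (by simpa using hp)
  have h2 := altGo_eq k p hp hm 0
  rw [h1, h2]; ring

-- ===== VERDICT (by name: the statement is the Claim_ definition above) =====
theorem Dec85_spec : Claim_equal_Dec85 := by
  intro m _ hpre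
  unfold Spec_Dec85
  simp only [Dec85, Dec85_alt]
  set L : Nat := m.toList.length with hL
  set q : Int := PySem.Int.floordiv (-(L : Int)) 5 with hqdef
  have hq : q * 5 ≤ -(L : Int) ∧ -(L : Int) < (q + 1) * 5 :=
    (PySem.Int.floordiv_eq_iff_of_pos (by norm_num)).mp hqdef.symm
  set K : Nat := (-q).toNat with hK
  set p : List Char := PySem.Chars.zfill m.toList (5 * -q) with hp
  have hplen : p.length = 5 * K := by
    rw [hp, PySem.Chars.length_zfill]
    omega
  have hmem : ∀ c ∈ p, c ∈ gZ85 := by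
    intro c hc
    rcases zfill_mem m.toList (5 * -q) c hc with hin | rfl
    · have := List.all_eq_true.mp hpre c hin
      simpa using this
    · decide
  have hbound : PySem.Int.floordiv ((p.reverse.length : Int)) 5 = (K : Int) := by
    rw [PySem.Int.floordiv_eq_iff_of_pos (by norm_num), List.length_reverse, hplen]
    push_cast
    omega
  rw [hbound]
  exact main_eq p K hplen hmem
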